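-- pv_equiv track=rewrite | github.com/DanGidanehin/coursework-3 | approximate_algorithm.py | _find_border_cells
-- ===== SOURCE A (Python) =====
-- from typing import Dict, List, Tuple
--
-- def _is_border_cell(
--     assignment_matrix: List[List[int]], i: int, j: int, m: int, n: int
-- ) -> bool:
--     """Перевіряє, чи є клітинка на межі з іншими забудовниками."""
--     if assignment_matrix[i][j] == 0:
--         return False
--
--     current_owner = assignment_matrix[i][j]
--     for di, dj in [(-1, 0), (1, 0), (0, -1), (0, 1)]:
--         ni, nj = i + di, j + dj
--         if (
--             0 <= ni < m
--             and 0 <= nj < n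
--             and assignment_matrix[ni][nj] != 0
--             and assignment_matrix[ni][nj] != current_owner
--         ):
--             return True
--     return False
--
-- def _find_border_cells(
--     assignment_matrix: List[List[int]], m: int, n: int
-- ) -> List[Tuple[int, int, int]]:
--     """Знаходить всі клітинки на межі між забудовниками."""
--     border_cells = []
--     for i in range(m):
--         for j in range(n):
--             if _is_border_cell(assignment_matrix, i, j, m, n):
--                 border_cells.append((i, j, assignment_matrix[i][j]))
--     return border_cells
-- ===== SOURCE B (Python) =====
-- def _find_border_cells(assignment_matrix, m, n):
--     """Edge scan: compare each cell to its right and down neighbour once,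
--     collect endpoints of differing nonzero pairs in a set, then emit them
--     in row-major order."""
--     border = set()
--     for i in range(m):
--         for j in range(n):
--             v = assignment_matrix[i][j]
--             if v == 0:
--                 continue
--             if j + 1 < n:
--                 w = assignment_matrix[i][j + 1]
--                 if w != 0 and w != v:
--                     border.add((i, j))
--                     border.add((i, j + 1))
--             if i + 1 < m:
--                 w = assignment_matrix[i + 1][j]
--                 if w != 0 and w != v:
--                     border.add((i, j))
--                     border.add((i + 1, j))
--     return [
--         (i, j, assignment_matrix[i][j])
--         for i in range(m)
--         for j in range(n)
--         if (i, j) in border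
--     ]
-- ===== Notes on version B (the rewrite author's own statement) =====
-- stated objective: alternative
-- what changed: Replaces A's per-cell probe of all four neighbours by a single right/down edge scan that collects both endpoints of each differing nonzero pair into a set, followed by a row-major emission pass over that set.
import Mathlib
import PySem

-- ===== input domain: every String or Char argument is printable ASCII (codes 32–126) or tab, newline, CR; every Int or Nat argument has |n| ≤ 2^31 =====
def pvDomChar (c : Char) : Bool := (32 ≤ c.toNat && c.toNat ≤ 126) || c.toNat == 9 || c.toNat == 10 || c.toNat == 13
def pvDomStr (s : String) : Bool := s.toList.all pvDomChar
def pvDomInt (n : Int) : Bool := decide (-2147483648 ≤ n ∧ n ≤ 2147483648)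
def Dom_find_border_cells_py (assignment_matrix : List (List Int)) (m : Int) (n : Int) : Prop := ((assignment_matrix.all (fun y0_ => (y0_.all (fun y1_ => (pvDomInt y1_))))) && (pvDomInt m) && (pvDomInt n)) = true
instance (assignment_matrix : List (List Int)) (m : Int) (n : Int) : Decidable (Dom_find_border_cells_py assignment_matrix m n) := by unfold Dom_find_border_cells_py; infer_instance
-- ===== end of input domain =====

-- B replaces the per-cell 4-neighbour probe by a single right/down edge scan into a set,
-- then a row-major emission pass (alternative decomposition, same asymptotic cost).

-- shared indexing helper: assignment_matrix[i][j]; exact for in-range indices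
-- (out-of-range accesses raise IndexError in Python and are excluded by Pre_)
def pvAtv (am : List (List Int)) (i j : Int) : Int :=
  (PySem.List.pyGet? ((PySem.List.pyGet? am i).getD []) j).getD 0

-- ===== PORT A =====
def is_border_cell (am : List (List Int)) (i j m n : Int) : Bool :=
  if pvAtv am i j == 0 then false
  else
    let cur := pvAtv am i j
    ([((-1 : Int), (0 : Int)), (1, 0), (0, -1), (0, 1)]).any (fun d =>
      let ni := i + d.1
      let nj := j + d.2
      decide (0 ≤ ni) && decide (ni < m) && decide (0 ≤ nj) && decide (nj < n)
        && (pvAtv am ni nj != 0) && (pvAtv am ni nj != cur))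

def find_border_cells_py (assignment_matrix : List (List Int)) (m : Int) (n : Int) : List (Int × Int × Int) :=
  (PySem.List.pyRange 0 m 1).foldl (fun acc i =>
    (PySem.List.pyRange 0 n 1).foldl (fun acc j =>
      if is_border_cell assignment_matrix i j m n then
        acc ++ [(i, j, pvAtv assignment_matrix i j)]
      else acc) acc) []

-- ===== PORT B =====
-- 'border.add((i,j)); border.add((i,j+1))' resp. '…(i+1,j)' under the two neighbour tests
def pvRightStep (am : List (List Int)) (n : Int) (s : PySem.Set (Int × Int)) (i j : Int) :
    PySem.Set (Int × Int) :=
  if decide (j + 1 < n) && (pvAtv am i (j + 1) != 0) && (pvAtv am i (j + 1) != pvAtv am i j)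
  then PySem.Set.add (PySem.Set.add s (i, j)) (i, j + 1) else s

def pvDownStep (am : List (List Int)) (m : Int) (s : PySem.Set (Int × Int)) (i j : Int) :
    PySem.Set (Int × Int) :=
  if decide (i + 1 < m) && (pvAtv am (i + 1) j != 0) && (pvAtv am (i + 1) j != pvAtv am i j)
  then PySem.Set.add (PySem.Set.add s (i, j)) (i + 1, j) else s

-- one body of B's edge-scan loop (the 'continue' on a zero cell, then the two tests)
def pvEdgeStep (am : List (List Int)) (m n : Int) (s : PySem.Set (Int × Int)) (i j : Int) :
    PySem.Set (Int × Int) :=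
  if pvAtv am i j == 0 then s
  else pvDownStep am m (pvRightStep am n s i j) i j

def pvBorderSet (am : List (List Int)) (m n : Int) : PySem.Set (Int × Int) :=
  (PySem.List.pyRange 0 m 1).foldl (fun s i =>
    (PySem.List.pyRange 0 n 1).foldl (fun s j =>
      pvEdgeStep am m n s i j) s) PySem.Set.empty

def find_border_cells_py_alt (assignment_matrix : List (List Int)) (m : Int) (n : Int) : List (Int × Int × Int) :=
  let border := pvBorderSet assignment_matrix m n
  (PySem.List.pyRange 0 m 1).foldl (fun acc i =>
    (PySem.List.pyRange 0 n 1).foldl (fun acc j =>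
      if PySem.Set.contains border (i, j) then
        acc ++ [(i, j, pvAtv assignment_matrix i j)]
      else acc) acc) []

-- ===== PRECONDITION & SPEC =====
-- Pre_ excludes exactly the inputs where Python's indexing raises IndexError:
-- m, n both positive while the matrix has fewer than m rows or one of the first m rows
-- has fewer than n entries.
def Pre_find_border_cells_py (assignment_matrix : List (List Int)) (m : Int) (n : Int) : Prop :=
  n ≤ 0 ∨ m ≤ 0 ∨
    (m ≤ (assignment_matrix.length : Int) ∧
      ∀ row ∈ assignment_matrix.take m.toNat, n ≤ (row.length : Int))
instance (assignment_matrix : List (List Int)) (m : Int) (n : Int) : Decidable (Pre_find_border_cells_py assignment_matrix m n) := by unfold Pre_find_border_cells_py; infer_instance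
def pvWitness_find_border_cells_py : List (List Int) × Int × Int := ([[1, 2], [1, 1]], 2, 2)

def Spec_find_border_cells_py (assignment_matrix : List (List Int)) (m : Int) (n : Int) (out : List (Int × Int × Int)) : Prop := out = find_border_cells_py_alt assignment_matrix m n
instance (assignment_matrix : List (List Int)) (m : Int) (n : Int) (out : List (Int × Int × Int)) : Decidable (Spec_find_border_cells_py assignment_matrix m n out) := by unfold Spec_find_border_cells_py; infer_instance

-- ===== CLAIM (what is proved, stated in full; the proofs are below) =====
def Claim_equal_find_border_cells_py : Prop := ∀ (assignment_matrix : List (List Int)) (m : Int) (n : Int), Dom_find_border_cells_py assignment_matrix m n → Pre_find_border_cells_py assignment_matrix m n → Spec_find_border_cells_py assignment_matrix m n (find_border_cells_py assignment_matrix m n)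

-- ===== LEMMAS AND PROOFS =====

-- what one edge-scan step may add for the scanner cell (i, j)
def pvQEdge (am : List (List Int)) (m n i j : Int) (p : Int × Int) : Prop :=
  pvAtv am i j ≠ 0 ∧
    ((j + 1 < n ∧ pvAtv am i (j + 1) ≠ 0 ∧ pvAtv am i (j + 1) ≠ pvAtv am i j ∧
        (p = (i, j) ∨ p = (i, j + 1))) ∨
     (i + 1 < m ∧ pvAtv am (i + 1) j ≠ 0 ∧ pvAtv am (i + 1) j ≠ pvAtv am i j ∧
        (p = (i, j) ∨ p = (i + 1, j))))

theorem mem_pvEdgeStep (am : List (List Int)) (m n : Int) (s : PySem.Set (Int × Int))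
    (i j : Int) (p : Int × Int) :
    p ∈ pvEdgeStep am m n s i j ↔ p ∈ s ∨ pvQEdge am m n i j p := by
  unfold pvEdgeStep pvDownStep pvRightStep pvQEdge
  split_ifs with h0 h1 h2 h3 <;>
    simp_all <;> tauto

theorem mem_foldl_iff {ι α : Type} (f : List α → ι → List α) (Q : ι → α → Prop)
    (hf : ∀ s x p, p ∈ f s x ↔ p ∈ s ∨ Q x p) :
    ∀ (l : List ι) (s : List α) (p : α),
      p ∈ l.foldl f s ↔ p ∈ s ∨ ∃ x ∈ l, Q x p := by
  intro l
  induction l with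
  | nil => intro s p; simp
  | cons x t ih =>
    intro s p
    rw [List.foldl_cons, ih, hf]
    simp only [List.mem_cons]
    constructor
    · rintro ((h | h) | ⟨y, hy, hQ⟩)
      · exact Or.inl h
      · exact Or.inr ⟨x, Or.inl rfl, h⟩
      · exact Or.inr ⟨y, Or.inr hy, hQ⟩
    · rintro (h | ⟨y, (rfl | hy), hQ⟩)
      · exact Or.inl (Or.inl h)
      · exact Or.inl (Or.inr hQ)
      · exact Or.inr ⟨y, hy, hQ⟩

-- membership in the border set built by B's scan
theorem mem_border (am : List (List Int)) (m n : Int) (p : Int × Int) :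
    p ∈ pvBorderSet am m n ↔
      ∃ i ∈ PySem.List.pyRange 0 m 1, ∃ j ∈ PySem.List.pyRange 0 n 1,
        pvQEdge am m n i j p := by
  unfold pvBorderSet
  rw [mem_foldl_iff _ (fun i p => ∃ j ∈ PySem.List.pyRange 0 n 1, pvQEdge am m n i j p)]
  · simp [PySem.Set.empty]
  · intro s i p
    rw [mem_foldl_iff _ (fun j p => pvQEdge am m n i j p)]
    intro s j p
    exact mem_pvEdgeStep am m n s i j p

-- Prop form of A's per-cell test, on an in-range cell
theorem is_border_cell_iff (am : List (List Int)) (i j m n : Int)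
    (hi0 : 0 ≤ i) (him : i < m) (hj0 : 0 ≤ j) (hjn : j < n) :
    is_border_cell am i j m n = true ↔
      pvAtv am i j ≠ 0 ∧
        ((0 ≤ i - 1 ∧ i - 1 < m ∧ pvAtv am (i - 1) j ≠ 0 ∧ pvAtv am (i - 1) j ≠ pvAtv am i j) ∨
         (i + 1 < m ∧ pvAtv am (i + 1) j ≠ 0 ∧ pvAtv am (i + 1) j ≠ pvAtv am i j) ∨
         (0 ≤ j - 1 ∧ j - 1 < n ∧ pvAtv am i (j - 1) ≠ 0 ∧ pvAtv am i (j - 1) ≠ pvAtv am i j) ∨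
         (j + 1 < n ∧ pvAtv am i (j + 1) ≠ 0 ∧ pvAtv am i (j + 1) ≠ pvAtv am i j)) := by
  unfold is_border_cell
  split_ifs with h0
  · rw [beq_iff_eq] at h0
    simp [h0]
  · have h0' : pvAtv am i j ≠ 0 := by simpa using h0
    have e1 : i + (-1 : Int) = i - 1 := by ring
    have e2 : j + (-1 : Int) = j - 1 := by ring
    simp only [List.any_cons, List.any_nil, Bool.or_false, Bool.or_eq_true,
      Bool.and_eq_true, decide_eq_true_eq, bne_iff_ne, e1, e2, add_zero, ne_eq, h0',
      not_false_iff, true_and]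
    constructor
    · rintro (⟨⟨⟨⟨⟨a,b⟩,c⟩,d⟩,e⟩,f⟩|⟨⟨⟨⟨⟨a,b⟩,c⟩,d⟩,e⟩,f⟩|⟨⟨⟨⟨⟨a,b⟩,c⟩,d⟩,e⟩,f⟩|⟨⟨⟨⟨⟨a,b⟩,c⟩,d⟩,e⟩,f⟩)
      · exact Or.inl ⟨a,b,e,f⟩
      · exact Or.inr (Or.inl ⟨b,e,f⟩)
      · exact Or.inr (Or.inr (Or.inl ⟨c,d,e,f⟩))
      · exact Or.inr (Or.inr (Or.inr ⟨d,e,f⟩))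
    · rintro (⟨a,b,e,f⟩|⟨b,e,f⟩|⟨c,d,e,f⟩|⟨d,e,f⟩)
      · exact Or.inl ⟨⟨⟨⟨⟨a,b⟩,hj0⟩,hjn⟩,e⟩,f⟩
      · exact Or.inr (Or.inl ⟨⟨⟨⟨⟨by omega,b⟩,hj0⟩,hjn⟩,e⟩,f⟩)
      · exact Or.inr (Or.inr (Or.inl ⟨⟨⟨⟨⟨hi0,him⟩,c⟩,d⟩,e⟩,f⟩))
      · exact Or.inr (Or.inr (Or.inr ⟨⟨⟨⟨⟨hi0,him⟩,by omega⟩,d⟩,e⟩,f⟩))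

-- on in-range cells, A's test coincides with membership in B's border set
theorem border_eq_is_border (am : List (List Int)) (m n i j : Int)
    (hi0 : 0 ≤ i) (him : i < m) (hj0 : 0 ≤ j) (hjn : j < n) :
    ((i, j) ∈ pvBorderSet am m n) ↔ is_border_cell am i j m n = true := by
  rw [mem_border, is_border_cell_iff am i j m n hi0 him hj0 hjn]
  simp only [PySem.List.mem_pyRange_one]
  constructor
  · rintro ⟨i', ⟨hi'0, hi'm⟩, j', ⟨hj'0, hj'n⟩, hv, hc⟩
    rcases hc with ⟨hlt, hnz, hne, hp | hp⟩ | ⟨hlt, hnz, hne, hp | hp⟩ <;>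
      (simp only [Prod.mk.injEq] at hp; obtain ⟨rfl, rfl⟩ := hp)
    · exact ⟨hv, Or.inr (Or.inr (Or.inr ⟨hlt, hnz, hne⟩))⟩
    · have e : j' + 1 - 1 = j' := by ring
      exact ⟨hnz, Or.inr (Or.inr (Or.inl ⟨by omega, by omega,
        by rw [e]; exact hv, by rw [e]; exact Ne.symm hne⟩))⟩
    · exact ⟨hv, Or.inr (Or.inl ⟨hlt, hnz, hne⟩)⟩
    · have e : i' + 1 - 1 = i' := by ring
      exact ⟨hnz, Or.inl ⟨by omega, by omega,
        by rw [e]; exact hv, by rw [e]; exact Ne.symm hne⟩⟩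
  · rintro ⟨hv, h | h | h | h⟩
    · -- up neighbour: scanner is (i-1, j), down edge
      obtain ⟨h1, h2, hnz, hne⟩ := h
      have e : i - 1 + 1 = i := by ring
      exact ⟨i - 1, ⟨h1, by omega⟩, j, ⟨hj0, hjn⟩, hnz,
        Or.inr ⟨by omega, by rw [e]; exact hv, by rw [e]; exact Ne.symm hne,
          Or.inr (by rw [e])⟩⟩
    · -- down neighbour: scanner is (i, j), down edge
      obtain ⟨h1, hnz, hne⟩ := h
      exact ⟨i, ⟨hi0, him⟩, j, ⟨hj0, hjn⟩, hv, Or.inr ⟨h1, hnz, hne, Or.inl rfl⟩⟩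
    · -- left neighbour: scanner is (i, j-1), right edge
      obtain ⟨h1, h2, hnz, hne⟩ := h
      have e : j - 1 + 1 = j := by ring
      exact ⟨i, ⟨hi0, him⟩, j - 1, ⟨h1, by omega⟩, hnz,
        Or.inl ⟨by omega, by rw [e]; exact hv, by rw [e]; exact Ne.symm hne,
          Or.inr (by rw [e])⟩⟩
    · -- right neighbour: scanner is (i, j), right edge
      obtain ⟨h1, hnz, hne⟩ := h
      exact ⟨i, ⟨hi0, him⟩, j, ⟨hj0, hjn⟩, hv, Or.inl ⟨h1, hnz, hne, Or.inl rfl⟩⟩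

-- ===== VERDICT (by name: the statement is the Claim_ definition above) =====
theorem find_border_cells_py_spec : Claim_equal_find_border_cells_py := by
  intro am m n _ _
  unfold Spec_find_border_cells_py find_border_cells_py find_border_cells_py_alt
  apply PySem.List.foldl_congr_mem
  intro acc i hi
  apply PySem.List.foldl_congr_mem
  intro acc' j hj
  rw [PySem.List.mem_pyRange_one] at hi hj
  have hb : PySem.Set.contains (pvBorderSet am m n) (i, j) = is_border_cell am i j m n := by
    rw [Bool.eq_iff_iff]
    rw [← border_eq_is_border am m n i j hi.1 hi.2 hj.1 hj.2]
    simp [PySem.Set.contains]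
  rw [hb]
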